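-- pv_equiv track=rewrite | github.com/julienpillis/TOP_Resolution | src/bin/test_genetic.py | is_valid_node_convoy
-- ===== SOURCE A (Python) =====
-- def is_valid_node_convoy(convoy):
--         for i,path1 in enumerate(convoy):
--             for node in path1[1:-1]:
--                 for j,path2 in enumerate(convoy):
--                     if i!=j:
--                         if node in path2[1:-1]:
--                             return False
--         return True
-- ===== SOURCE B (Python) =====
-- def is_valid_node_convoy(convoy):
--     seen = set()
--     for path in convoy:
--         inter = set(path[1:-1])
--         if inter & seen:
--             return False
--         seen |= inter
--     return True
-- ===== Notes on version B (the rewrite author's own statement) =====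
-- stated objective: simpler
-- what changed: Replaced the triple nested loop comparing every interior node of every path against every other path with a single pass that accumulates a set of interior nodes seen in earlier paths (deduplicated per path, so intra-path repeats cannot conflict).
import Mathlib
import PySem

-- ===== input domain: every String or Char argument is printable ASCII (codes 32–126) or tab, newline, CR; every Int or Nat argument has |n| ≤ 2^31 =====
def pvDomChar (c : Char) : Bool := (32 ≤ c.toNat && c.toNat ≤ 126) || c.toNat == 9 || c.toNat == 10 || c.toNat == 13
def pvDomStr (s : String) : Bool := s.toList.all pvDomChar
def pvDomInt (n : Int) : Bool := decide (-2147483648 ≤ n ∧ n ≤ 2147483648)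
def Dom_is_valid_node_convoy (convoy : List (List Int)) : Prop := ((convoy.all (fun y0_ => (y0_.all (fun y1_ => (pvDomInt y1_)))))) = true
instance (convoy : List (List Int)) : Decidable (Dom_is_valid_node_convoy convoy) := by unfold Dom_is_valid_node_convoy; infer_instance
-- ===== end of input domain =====

-- B replaces A's triple nested scan with one pass over the paths maintaining a set of
-- interior nodes claimed by earlier paths (deduplicated per path).

-- ===== PORT A =====
-- path[1:-1]
def pvMid (p : List Int) : List Int := PySem.List.slice p (some 1) (some (-1))

def is_valid_node_convoy (convoy : List (List Int)) : Bool :=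
  -- 'for … return False' loops become .any; the function returns the negation
  !((PySem.List.enumerate convoy 0).any (fun ip =>
      (pvMid ip.2).any (fun node =>
        (PySem.List.enumerate convoy 0).any (fun jp =>
          (ip.1 != jp.1) && (pvMid jp.2).contains node))))

-- ===== PORT B =====
def pvAltLoop (seen : PySem.Set Int) (paths : List (List Int)) : Bool :=
  match paths with
  | [] => true
  | p :: rest =>
      let inter : PySem.Set Int := PySem.Set.ofList (pvMid p)
      if !(PySem.Set.inter inter seen).isEmpty then false
      else pvAltLoop (PySem.Set.union seen inter) rest

def is_valid_node_convoy_alt (convoy : List (List Int)) : Bool :=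
  pvAltLoop PySem.Set.empty convoy

-- ===== PRECONDITION & SPEC =====
def Spec_is_valid_node_convoy (convoy : List (List Int)) (out : Bool) : Prop := out = is_valid_node_convoy_alt convoy
instance (convoy : List (List Int)) (out : Bool) : Decidable (Spec_is_valid_node_convoy convoy out) := by unfold Spec_is_valid_node_convoy; infer_instance

-- ===== CLAIM (what is proved, stated in full; the proofs are below) =====
def Claim_equal_is_valid_node_convoy : Prop := ∀ (convoy : List (List Int)), Dom_is_valid_node_convoy convoy → Spec_is_valid_node_convoy convoy (is_valid_node_convoy convoy)

-- ===== LEMMAS AND PROOFS =====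

-- "interiors of p and q are disjoint"
def pvDj (p q : List Int) : Prop := ∀ x ∈ pvMid p, x ∉ pvMid q

theorem pvDj_symm {p q : List Int} (h : pvDj p q) : pvDj q p := by
  intro x hx hxp
  exact h x hxp hx

theorem pvA_true_iff (convoy : List (List Int)) :
    is_valid_node_convoy convoy = true ↔
      ∀ (i j : Nat) (hi : i < convoy.length) (hj : j < convoy.length),
        i ≠ j → pvDj convoy[i] convoy[j] := by
  unfold is_valid_node_convoy
  simp only [Bool.not_eq_eq_eq_not, Bool.not_true, List.any_eq_false, Bool.not_eq_true,
    Bool.and_eq_false_iff, bne_eq_false_iff_eq]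
  constructor
  · intro h i j hi hj hij x hx hxj
    have hmi : ((0 : Int) + i, convoy[i]) ∈ PySem.List.enumerate convoy 0 :=
      (PySem.List.mem_enumerate_iff convoy 0 _).2 ⟨i, hi, rfl⟩
    have hmj : ((0 : Int) + j, convoy[j]) ∈ PySem.List.enumerate convoy 0 :=
      (PySem.List.mem_enumerate_iff convoy 0 _).2 ⟨j, hj, rfl⟩
    rcases h _ hmi x hx _ hmj with heq | hc
    · exact hij (by exact_mod_cast (by omega : (i : Int) = j))
    · simp only [List.contains_eq_mem, decide_eq_false_iff_not] at hc
      exact hc hxj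
  · intro h ip hip x hx jp hjp
    rcases (PySem.List.mem_enumerate_iff convoy 0 ip).1 hip with ⟨i, hi, rfl⟩
    rcases (PySem.List.mem_enumerate_iff convoy 0 jp).1 hjp with ⟨j, hj, rfl⟩
    by_cases hij : i = j
    · subst hij; exact Or.inl rfl
    · refine Or.inr ?_
      simp only [List.contains_eq_mem, decide_eq_false_iff_not]
      exact h i j hi hj hij x hx

theorem pvAlt_true_iff (paths : List (List Int)) (seen : PySem.Set Int) :
    pvAltLoop seen paths = true ↔
      List.Pairwise pvDj paths ∧ ∀ p ∈ paths, ∀ x ∈ pvMid p, x ∉ seen := by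
  induction paths generalizing seen with
  | nil => simp [pvAltLoop]
  | cons p rest ih =>
    simp only [pvAltLoop]
    by_cases hd : (PySem.Set.inter (PySem.Set.ofList (pvMid p)) seen).isEmpty = true
    · simp only [hd, Bool.not_true, Bool.false_eq_true, if_false, ih, List.pairwise_cons,
        List.mem_cons]
      have hdis : ∀ x ∈ pvMid p, x ∉ seen := by
        intro x hx hxs
        rw [List.isEmpty_iff, PySem.Set.inter, List.filter_eq_nil_iff] at hd
        exact hd x ((PySem.Set.mem_ofList _ _).2 hx) (by simpa using hxs)
      constructor
      · rintro ⟨hpw, hall⟩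
        refine ⟨⟨fun q hq x hx hxq => ?_, hpw⟩, ?_⟩
        · exact (hall q hq x hxq) ((PySem.Set.mem_union seen _ x).2 (Or.inr ((PySem.Set.mem_ofList _ _).2 hx)))
        · rintro q (rfl | hq) x hx
          · exact hdis x hx
          · intro hxs
            exact hall q hq x hx ((PySem.Set.mem_union seen _ x).2 (Or.inl hxs))
      · rintro ⟨⟨hp, hpw⟩, hall⟩
        refine ⟨hpw, fun q hq x hx hxu => ?_⟩
        rcases (PySem.Set.mem_union seen _ x).1 hxu with hxs | hxp
        · exact hall q (Or.inr hq) x hx hxs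
        · exact hp q hq x ((PySem.Set.mem_ofList _ _).1 hxp) hx
    · simp only [hd]
      simp only [List.isEmpty_iff, PySem.Set.inter, List.filter_eq_nil_iff] at hd
      push Not at hd
      rcases hd with ⟨x, hxp, hxs⟩
      have hxp' : x ∈ pvMid p := (PySem.Set.mem_ofList _ _).1 hxp
      have hxs' : x ∈ seen := by simpa using hxs
      simp only [Bool.not_false, if_true]
      constructor
      · intro h; exact absurd h (by simp)
      · rintro ⟨_, hall⟩
        exact absurd hxs' (hall p (List.mem_cons_self) x hxp')

theorem pv_pairwise_iff (convoy : List (List Int)) :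
    List.Pairwise pvDj convoy ↔
      ∀ (i j : Nat) (hi : i < convoy.length) (hj : j < convoy.length),
        i ≠ j → pvDj convoy[i] convoy[j] := by
  rw [List.pairwise_iff_getElem]
  constructor
  · intro h i j hi hj hij
    rcases Nat.lt_or_ge i j with hlt | hge
    · exact h i j hi hj hlt
    · exact pvDj_symm (h j i hj hi (by omega))
  · intro h i j hi hj hlt
    exact h i j hi hj (by omega)

-- ===== VERDICT (by name: the statement is the Claim_ definition above) =====
theorem is_valid_node_convoy_spec : Claim_equal_is_valid_node_convoy := by
  intro convoy _
  unfold Spec_is_valid_node_convoy is_valid_node_convoy_alt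
  have hiff : is_valid_node_convoy convoy = true ↔ pvAltLoop PySem.Set.empty convoy = true := by
    rw [pvA_true_iff, pvAlt_true_iff, pv_pairwise_iff]
    simp [PySem.Set.empty]
  cases hA : is_valid_node_convoy convoy <;> cases hB : pvAltLoop PySem.Set.empty convoy <;>
    simp_all
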